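-- pv_equiv track=rewrite | github.com/dmintser-art/machine-unlearning | run_rmu_until_target.py | _sanitize_passthrough_args
-- ===== SOURCE A (Python) =====
-- from typing import Dict, List, Optional, Tuple
--
-- def _sanitize_passthrough_args(args: List[str]) -> List[str]:
--     """Drop flags controlled by target mode wrapper to avoid accidental overrides."""
--     blocked = {"--output_dir", "--max_num_batches", "--checkpoint_interval", "--save_checkpoints"}
--     out: List[str] = []
--     skip_next = False
--     for i, tok in enumerate(args):
--         if skip_next:
--             skip_next = False
--             continue
--         if tok in blocked:
--             if tok != "--save_checkpoints":
--                 skip_next = True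
--             continue
--         # Also handle --flag=value style.
--         key = tok.split("=", 1)[0]
--         if key in blocked:
--             continue
--         out.append(tok)
--     return out
-- ===== SOURCE B (Python) =====
-- from typing import List
--
-- def _sanitize_passthrough_args(args: List[str]) -> List[str]:
--     """Drop flags controlled by target mode wrapper to avoid accidental overrides."""
--     blocked = {"--output_dir", "--max_num_batches", "--checkpoint_interval", "--save_checkpoints"}
--     # Pass 1: collect the indices to remove.
--     drop = set()
--     for i, tok in enumerate(args):
--         if i in drop:
--             continue
--         if tok.split("=", 1)[0] in blocked:
--             drop.add(i)
--             if tok in blocked and tok != "--save_checkpoints":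
--                 drop.add(i + 1)
--     # Pass 2: keep everything not marked for removal.
--     return [tok for i, tok in enumerate(args) if i not in drop]
-- ===== Notes on version B (the rewrite author's own statement) =====
-- stated objective: alternative
-- what changed: Replaced the single-pass accumulator with skip_next state by a two-pass algorithm: a first pass builds a set of indices to drop (the flag's own index, plus the following index for exact value-taking blocked flags), and a second pass returns the tokens whose index is not in that set.
import Mathlib
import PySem

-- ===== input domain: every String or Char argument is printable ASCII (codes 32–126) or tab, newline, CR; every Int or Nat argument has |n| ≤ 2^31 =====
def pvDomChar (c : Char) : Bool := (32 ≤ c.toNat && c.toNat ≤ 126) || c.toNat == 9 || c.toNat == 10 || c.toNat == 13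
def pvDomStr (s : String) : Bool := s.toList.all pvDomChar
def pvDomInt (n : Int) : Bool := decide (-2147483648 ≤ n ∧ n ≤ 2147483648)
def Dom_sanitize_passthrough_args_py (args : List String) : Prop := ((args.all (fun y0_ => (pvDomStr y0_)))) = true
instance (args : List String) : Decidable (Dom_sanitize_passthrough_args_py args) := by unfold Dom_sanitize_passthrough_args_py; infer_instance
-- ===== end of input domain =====

-- B replaces A's single pass with skip_next state by a two-pass algorithm: first build
-- the set of indices to drop, then keep the tokens whose index is not in it (objective: alternative).

-- shared literal: the blocked set {"--output_dir", "--max_num_batches", "--checkpoint_interval", "--save_checkpoints"}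
def pvBlocked : List String := ["--output_dir", "--max_num_batches", "--checkpoint_interval", "--save_checkpoints"]

-- exact port of tok.split("=", 1)[0]: sep is nonempty so split returns some, and the
-- result list is never empty, so taking element 0 never raises; headD "" is exact here.
def pvKey (tok : String) : String := ((PySem.Str.splitMax? tok "=" 1).getD []).headD ""

-- ===== PORT A =====
-- literal transliteration of A's for-loop: state (out, skip_next), branches in source order
def sanitize_passthrough_args_py (args : List String) : List String :=
  (args.foldl (fun (st : List String × Bool) tok =>
    if st.2 then (st.1, false)
    else if tok ∈ pvBlocked then (st.1, tok ≠ "--save_checkpoints")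
    else if pvKey tok ∈ pvBlocked then (st.1, false)
    else (st.1 ++ [tok], false)) ([], false)).1

-- ===== PORT B =====
-- pass 1 of Source B: fold over enumerate(args), building the set of indices to drop
def pvPass1 : List (Int × String) → PySem.Set Int → PySem.Set Int
  | [], drop => drop
  | (i, tok) :: rest, drop =>
    if i ∈ drop then pvPass1 rest drop
    else if pvKey tok ∈ pvBlocked then
      let drop1 := PySem.Set.add drop i
      let drop2 := if tok ∈ pvBlocked ∧ tok ≠ "--save_checkpoints"
                   then PySem.Set.add drop1 (i + 1) else drop1
      pvPass1 rest drop2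
    else pvPass1 rest drop

-- pass 2 of Source B: the comprehension [tok for i, tok in enumerate(args) if i not in drop]
def sanitize_passthrough_args_py_alt (args : List String) : List String :=
  let e := PySem.List.enumerate args 0
  let drop := pvPass1 e PySem.Set.empty
  (e.filter (fun p => !(PySem.Set.contains drop p.1))).map (fun p => p.2)

-- ===== PRECONDITION & SPEC =====
def Spec_sanitize_passthrough_args_py (args : List String) (out : List String) : Prop := out = sanitize_passthrough_args_py_alt args
instance (args : List String) (out : List String) : Decidable (Spec_sanitize_passthrough_args_py args out) := by unfold Spec_sanitize_passthrough_args_py; infer_instance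

-- ===== CLAIM =====
def Claim_equal_sanitize_passthrough_args_py : Prop := ∀ (args : List String), Dom_sanitize_passthrough_args_py args → Spec_sanitize_passthrough_args_py args (sanitize_passthrough_args_py args)

-- ===== LEMMAS AND PROOFS =====

-- common characterisation of both programs: structural recursion with an explicit skip flag
def pvH : Bool → List String → List String
  | _, [] => []
  | true, _ :: r => pvH false r
  | false, t :: r =>
    if t ∈ pvBlocked then (if t = "--save_checkpoints" then pvH false r else pvH true r)
    else if pvKey t ∈ pvBlocked then pvH false r
    else t :: pvH false r

-- a blocked flag contains no '=', so its key is itself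
theorem pvKey_of_blocked : ∀ t ∈ pvBlocked, pvKey t = t := by decide

-- pass 1 only ever adds elements
theorem pvPass1_grow : ∀ (L : List (Int × String)) (d : PySem.Set Int) (j : Int),
    j ∈ d → j ∈ pvPass1 L d := by
  intro L
  induction L with
  | nil => intro d j h; simpa [pvPass1] using h
  | cons p rest ih =>
    intro d j h
    obtain ⟨i, tok⟩ := p
    simp only [pvPass1]
    split_ifs with h1 h2 h3
    · exact ih d j h
    · exact ih _ j (by simp [PySem.Set.mem_add, h])
    · exact ih _ j (by simp [PySem.Set.mem_add, h])
    · exact ih d j h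

-- on enumerate l k, pass 1 only adds indices ≥ k
theorem pvPass1_bound : ∀ (l : List String) (k : Int) (d : PySem.Set Int) (j : Int),
    j ∈ pvPass1 (PySem.List.enumerate l k) d → j ∈ d ∨ k ≤ j := by
  intro l
  induction l with
  | nil => intro k d j h; simp only [PySem.List.enumerate_nil, pvPass1] at h; exact Or.inl h
  | cons t r ih =>
    intro k d j h
    rw [PySem.List.enumerate_cons] at h
    simp only [pvPass1] at h
    split_ifs at h with h1 h2 h3
    · rcases ih _ _ _ h with h' | h'
      · exact Or.inl h'
      · exact Or.inr (by omega)
    · rcases ih _ _ _ h with h' | h'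
      · simp only [PySem.Set.mem_add] at h'
        rcases h' with (h' | h') | h'
        · exact Or.inl h'
        · exact Or.inr (by omega)
        · exact Or.inr (by omega)
      · exact Or.inr (by omega)
    · rcases ih _ _ _ h with h' | h'
      · simp only [PySem.Set.mem_add] at h'
        rcases h' with h' | h'
        · exact Or.inl h'
        · exact Or.inr (by omega)
      · exact Or.inr (by omega)
    · rcases ih _ _ _ h with h' | h'
      · exact Or.inl h'
      · exact Or.inr (by omega)

-- B's two passes compute pvH, generalised over the start index and pending drop set
theorem pvPass_filter_eq_pvH : ∀ (l : List String) (k : Int) (d : PySem.Set Int),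
    (∀ j ∈ d, j ≤ k) →
    ((PySem.List.enumerate l k).filter
        (fun p => !(PySem.Set.contains (pvPass1 (PySem.List.enumerate l k) d) p.1))).map (fun p => p.2)
      = pvH (decide (k ∈ d)) l := by
  intro l
  induction l with
  | nil => intro k d _; simp [PySem.List.enumerate_nil, pvH]
  | cons t r ih =>
    intro k d hd
    rw [PySem.List.enumerate_cons]
    by_cases hk : k ∈ d
    · -- token at index k was marked: it is skipped in both passes
      have hstep : pvPass1 ((k, t) :: PySem.List.enumerate r (k + 1)) d
          = pvPass1 (PySem.List.enumerate r (k + 1)) d := by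
        simp [pvPass1, hk]
      have hmem : k ∈ pvPass1 (PySem.List.enumerate r (k + 1)) d :=
        pvPass1_grow _ _ _ hk
      have hk1 : (k + 1) ∉ d := fun h => by have := hd _ h; omega
      have := ih (k + 1) d (fun j hj => by have := hd _ hj; omega)
      rw [hstep, List.filter_cons]
      have hc : (!(PySem.Set.contains (pvPass1 (PySem.List.enumerate r (k + 1)) d) k)) = false := by
        simp [PySem.Set.contains_eq_listContains, hmem]
      rw [hc, if_neg (by simp), this]
      simp [pvH, hk, hk1]
    · by_cases hkey : pvKey t ∈ pvBlocked
      · by_cases hcond : t ∈ pvBlocked ∧ t ≠ "--save_checkpoints"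
        · -- exact value-taking blocked flag: drop k and k+1
          have hstep : pvPass1 ((k, t) :: PySem.List.enumerate r (k + 1)) d
              = pvPass1 (PySem.List.enumerate r (k + 1))
                  (PySem.Set.add (PySem.Set.add d k) (k + 1)) := by
            simp [pvPass1, hk, hkey, hcond]
          have hmem : k ∈ pvPass1 (PySem.List.enumerate r (k + 1))
              (PySem.Set.add (PySem.Set.add d k) (k + 1)) :=
            pvPass1_grow _ _ _ (by simp [PySem.Set.mem_add])
          have hk1 : (k + 1) ∈ PySem.Set.add (PySem.Set.add d k) (k + 1) := by
            simp [PySem.Set.mem_add]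
          have := ih (k + 1) (PySem.Set.add (PySem.Set.add d k) (k + 1))
            (fun j hj => by
              simp only [PySem.Set.mem_add] at hj
              rcases hj with (hj | hj) | hj
              · have := hd _ hj; omega
              · omega
              · omega)
          rw [hstep, List.filter_cons]
          have hc : (!(PySem.Set.contains (pvPass1 (PySem.List.enumerate r (k + 1))
              (PySem.Set.add (PySem.Set.add d k) (k + 1))) k)) = false := by
            simp [PySem.Set.contains_eq_listContains, hmem]
          rw [hc, if_neg (by simp), this]
          simp [pvH, hk, hcond.1, hcond.2]
        · -- --save_checkpoints, or a --flag=value form: drop only k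
          have hstep : pvPass1 ((k, t) :: PySem.List.enumerate r (k + 1)) d
              = pvPass1 (PySem.List.enumerate r (k + 1)) (PySem.Set.add d k) := by
            simp [pvPass1, hk, hkey, hcond]
          have hmem : k ∈ pvPass1 (PySem.List.enumerate r (k + 1)) (PySem.Set.add d k) :=
            pvPass1_grow _ _ _ (by simp [PySem.Set.mem_add])
          have hk1 : (k + 1) ∉ PySem.Set.add d k := by
            simp only [PySem.Set.mem_add]
            rintro (hj | hj)
            · have := hd _ hj; omega
            · omega
          have := ih (k + 1) (PySem.Set.add d k)
            (fun j hj => by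
              simp only [PySem.Set.mem_add] at hj
              rcases hj with hj | hj
              · have := hd _ hj; omega
              · omega)
          rw [hstep, List.filter_cons]
          have hc : (!(PySem.Set.contains (pvPass1 (PySem.List.enumerate r (k + 1))
              (PySem.Set.add d k)) k)) = false := by
            simp [PySem.Set.contains_eq_listContains, hmem]
          rw [hc, if_neg (by simp), this]
          have hk1' : (k + 1) ∉ d := fun h => hk1 (by simp [PySem.Set.mem_add, h])
          by_cases hb : t ∈ pvBlocked
          · have hs : t = "--save_checkpoints" := by
              by_contra hs; exact hcond ⟨hb, hs⟩
            simp [pvH, hk, hs, hk1', pvBlocked]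
          · simp [pvH, hk, hb, hkey, hk1']
      · -- ordinary token: kept
        have hb : t ∉ pvBlocked := fun hb => hkey (by rw [pvKey_of_blocked t hb]; exact hb)
        have hstep : pvPass1 ((k, t) :: PySem.List.enumerate r (k + 1)) d
            = pvPass1 (PySem.List.enumerate r (k + 1)) d := by
          simp [pvPass1, hk, hkey]
        have hmem : k ∉ pvPass1 (PySem.List.enumerate r (k + 1)) d := by
          intro h
          rcases pvPass1_bound _ _ _ _ h with h' | h'
          · exact hk h'
          · omega
        have hk1 : (k + 1) ∉ d := fun h => by have := hd _ h; omega
        have := ih (k + 1) d (fun j hj => by have := hd _ hj; omega)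
        rw [hstep, List.filter_cons]
        have hc : (!(PySem.Set.contains (pvPass1 (PySem.List.enumerate r (k + 1)) d) k)) = true := by
          simp [PySem.Set.contains_eq_listContains, hmem]
        rw [hc, if_pos rfl, List.map_cons, this]
        simp [pvH, hk, hb, hkey, hk1]

-- A's loop body, named so the invariant below can be stated about it (definitionally the port's lambda)
def pvStep (st : List String × Bool) (tok : String) : List String × Bool :=
  if st.2 then (st.1, false)
  else if tok ∈ pvBlocked then (st.1, tok ≠ "--save_checkpoints")
  else if pvKey tok ∈ pvBlocked then (st.1, false)
  else (st.1 ++ [tok], false)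

-- A's fold, started in either skip state, computes pvH of the remaining suffix
theorem pvFold_eq_pvH (l : List String) : ∀ out : List String,
    ((l.foldl pvStep (out, false)).1 = out ++ pvH false l)
  ∧ ((l.foldl pvStep (out, true)).1 = out ++ pvH true l) := by
  induction l with
  | nil => intro out; simp [pvH]
  | cons tok rest ih =>
    intro out
    constructor
    · by_cases h1 : tok ∈ pvBlocked
      · by_cases h2 : tok = "--save_checkpoints"
        · have c : pvStep (out, false) tok = (out, false) := by simp [pvStep, pvBlocked, h2]
          rw [List.foldl_cons, c]
          simp only [pvH, h2, if_true]
          exact (ih out).1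
        · have c : pvStep (out, false) tok = (out, true) := by simp [pvStep, h1, h2]
          rw [List.foldl_cons, c]
          simp only [pvH, h1, h2, if_true, if_false]
          exact (ih out).2
      · by_cases h3 : pvKey tok ∈ pvBlocked
        · have c : pvStep (out, false) tok = (out, false) := by simp [pvStep, h1, h3]
          rw [List.foldl_cons, c]
          simp only [pvH, h1, h3, if_true, if_false]
          exact (ih out).1
        · have c : pvStep (out, false) tok = (out ++ [tok], false) := by simp [pvStep, h1, h3]
          rw [List.foldl_cons, c, (ih (out ++ [tok])).1]
          simp only [pvH, h1, h3]
          simp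
    · have c : pvStep (out, true) tok = (out, false) := by simp [pvStep]
      rw [List.foldl_cons, c]
      simpa [pvH] using (ih out).1

-- ===== VERDICT =====
theorem sanitize_passthrough_args_py_spec : Claim_equal_sanitize_passthrough_args_py := by
  intro args _
  unfold Spec_sanitize_passthrough_args_py sanitize_passthrough_args_py sanitize_passthrough_args_py_alt
  have hB := pvPass_filter_eq_pvH args 0 PySem.Set.empty (by intro j hj; cases hj)
  have h0 : decide ((0 : Int) ∈ PySem.Set.empty) = false := by decide
  rw [h0] at hB
  simp only [hB]
  show (List.foldl pvStep ([], false) args).1 = pvH false args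
  rw [(pvFold_eq_pvH args []).1, List.nil_append]
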